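-- pv_equiv track=rewrite | github.com/jorickvm/jorickvm.github.io | scripts/article_image_lib.py | select_article_keys
-- ===== SOURCE A (Python) =====
-- from typing import Any
--
-- def select_article_keys(
--     plan: dict[str, Any],
--     section_filter: str,
--     slug: str | None,
--     limit: int,
-- ) -> list[str]:
--     keys = list(plan["articles"].keys())
--     if section_filter != "all":
--         keys = [key for key in keys if key.startswith(f"{section_filter}/")]
--     if slug:
--         keys = [key for key in keys if key.split("/", 1)[1] == slug]
--     if limit > 0:
--         keys = keys[:limit]
--     return keys
-- ===== SOURCE B (Python) =====
-- def select_article_keys(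
--     plan,
--     section_filter,
--     slug,
--     limit,
-- ):
--     # One early-terminating pass instead of three sequential list passes.
--     result = []
--     for key in plan["articles"].keys():
--         if section_filter != "all" and not key.startswith(section_filter + "/"):
--             continue
--         if slug and key.split("/", 1)[1] != slug:
--             continue
--         result.append(key)
--         if limit > 0 and len(result) == limit:
--             break
--     return result
-- ===== Notes on version B (the rewrite author's own statement) =====
-- stated objective: alternative
-- what changed: Replaces the three sequential list-comprehension passes (section filter, slug filter, slice) with a single explicit loop that tests each key once and breaks as soon as the limit is reached.
import Mathlib
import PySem

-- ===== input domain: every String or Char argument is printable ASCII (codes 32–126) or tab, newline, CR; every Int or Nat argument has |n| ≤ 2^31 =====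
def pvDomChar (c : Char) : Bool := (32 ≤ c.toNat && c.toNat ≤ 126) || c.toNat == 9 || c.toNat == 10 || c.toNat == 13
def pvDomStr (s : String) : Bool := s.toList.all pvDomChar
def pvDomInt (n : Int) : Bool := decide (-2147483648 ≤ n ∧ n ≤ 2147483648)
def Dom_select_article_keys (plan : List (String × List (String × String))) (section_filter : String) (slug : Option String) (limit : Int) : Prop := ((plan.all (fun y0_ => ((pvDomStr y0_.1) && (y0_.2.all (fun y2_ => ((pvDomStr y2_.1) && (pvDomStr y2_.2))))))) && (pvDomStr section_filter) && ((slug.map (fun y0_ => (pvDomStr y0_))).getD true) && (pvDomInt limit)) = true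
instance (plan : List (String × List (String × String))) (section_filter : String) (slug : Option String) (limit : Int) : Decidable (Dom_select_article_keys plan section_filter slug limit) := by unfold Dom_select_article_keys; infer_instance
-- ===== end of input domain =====

-- B replaces A's three sequential list passes by one explicit early-breaking loop (alternative decomposition, same cost).


-- ===== PORT A =====
-- list(plan["articles"].keys()); the KeyError case (no "articles" key) is excluded by Pre_ (getD []).
def articleKeys (plan : List (String × List (String × String))) : List String :=
  PySem.Dict.keys (PySem.Dict.ofList (((PySem.Dict.ofList plan).get? "articles").getD []))

-- key.split("/", 1)[1]; the IndexError case (no "/" in key) is excluded by Pre_ (pyGetD "").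
def slugPart (key : String) : String :=
  PySem.List.pyGetD ((PySem.Str.splitMax? key "/" 1).getD []) 1 ""

def select_article_keys (plan : List (String × List (String × String))) (section_filter : String) (slug : Option String) (limit : Int) : List String :=
  let keys0 := articleKeys plan
  let keys1 := if section_filter ≠ "all" then keys0.filter (fun key => PySem.Str.startswith key (section_filter ++ "/")) else keys0
  let keys2 := if slug.getD "" ≠ "" then keys1.filter (fun key => slugPart key == slug.getD "") else keys1
  if limit > 0 then PySem.List.slice keys2 none (some limit) else keys2

-- ===== PORT B =====
def skipSection (section_filter key : String) : Bool :=
  (section_filter != "all") && !(PySem.Str.startswith key (section_filter ++ "/"))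

def skipSlug (slug : Option String) (key : String) : Bool :=
  (slug.getD "" != "") && (slugPart key != slug.getD "")

def altLoop (section_filter : String) (slug : Option String) (limit : Int) :
    List String → List String → List String
  | result, [] => result
  | result, key :: rest =>
    if skipSection section_filter key then altLoop section_filter slug limit result rest
    else if skipSlug slug key then altLoop section_filter slug limit result rest
    else
      let result' := result ++ [key]
      if limit > 0 ∧ (result'.length : Int) = limit then result'
      else altLoop section_filter slug limit result' rest

def select_article_keys_alt (plan : List (String × List (String × String))) (section_filter : String) (slug : Option String) (limit : Int) : List String :=
  altLoop section_filter slug limit [] (articleKeys plan)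

-- ===== PRECONDITION & SPEC =====
-- Pre_ excludes exactly the inputs where A raises: a KeyError when plan has no "articles" key, and an
-- IndexError from key.split("/",1)[1] when slug is truthy, section_filter is "all", and some article key
-- contains no "/" (with any other section_filter every surviving key contains "/").
def Pre_select_article_keys (plan : List (String × List (String × String))) (section_filter : String) (slug : Option String) (limit : Int) : Prop :=
  (PySem.Dict.ofList plan).contains "articles" = true ∧
  (slug.getD "" ≠ "" → section_filter = "all" →
    ∀ p ∈ ((PySem.Dict.ofList plan).get? "articles").getD [], PySem.Str.isIn "/" p.1 = true)
instance (plan : List (String × List (String × String))) (section_filter : String) (slug : Option String) (limit : Int) : Decidable (Pre_select_article_keys plan section_filter slug limit) := by unfold Pre_select_article_keys; infer_instance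

def pvWitness_select_article_keys : (List (String × List (String × String))) × String × Option String × Int :=
  ([("articles", [("blog/hello", "x"), ("news/bye", "y")])], "all", some "hello", 1)

def Spec_select_article_keys (plan : List (String × List (String × String))) (section_filter : String) (slug : Option String) (limit : Int) (out : List String) : Prop := out = select_article_keys_alt plan section_filter slug limit
instance (plan : List (String × List (String × String))) (section_filter : String) (slug : Option String) (limit : Int) (out : List String) : Decidable (Spec_select_article_keys plan section_filter slug limit out) := by unfold Spec_select_article_keys; infer_instance

-- ===== CLAIM (what is proved, stated in full; the proofs are below) =====
def Claim_equal_select_article_keys : Prop := ∀ (plan : List (String × List (String × String))) (section_filter : String) (slug : Option String) (limit : Int), Dom_select_article_keys plan section_filter slug limit → Pre_select_article_keys plan section_filter slug limit → Spec_select_article_keys plan section_filter slug limit (select_article_keys plan section_filter slug limit)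

-- ===== LEMMAS AND PROOFS =====
-- The keep-predicate of B's loop.
def keepKey (section_filter : String) (slug : Option String) (key : String) : Bool :=
  !(skipSection section_filter key) && !(skipSlug slug key)

theorem altLoop_spec (section_filter : String) (slug : Option String) (limit : Int)
    (keys : List String) :
    ∀ result : List String, (limit > 0 → (result.length : Int) < limit) →
    altLoop section_filter slug limit result keys =
      if limit > 0 then result ++ (keys.filter (keepKey section_filter slug)).take (limit.toNat - result.length)
      else result ++ keys.filter (keepKey section_filter slug) := by
  induction keys with
  | nil => intro result _; simp [altLoop]
  | cons key rest ih =>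
    intro result hlt
    by_cases hs : skipSection section_filter key
    · have hk : keepKey section_filter slug key = false := by simp [keepKey, hs]
      simp only [altLoop, hs, if_pos]
      rw [ih result hlt]
      simp [List.filter_cons, hk]
    · by_cases hl : skipSlug slug key
      · have hk : keepKey section_filter slug key = false := by simp [keepKey, hl]
        simp only [altLoop]
        rw [if_neg (by simp [hs]), if_pos (by simp [hl]), ih result hlt]
        simp [List.filter_cons, hk]
      · have hk : keepKey section_filter slug key = true := by simp [keepKey, hs, hl]
        simp only [altLoop]
        rw [if_neg (by simp [hs]), if_neg (by simp [hl])]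
        by_cases hlim : limit > 0
        · by_cases hfull : ((result ++ [key]).length : Int) = limit
          · rw [if_pos ⟨hlim, hfull⟩]
            have : limit.toNat - result.length = 1 := by
              simp at hfull; omega
            simp [hlim, hk, this]
          · rw [if_neg (by tauto)]
            have hlt' : limit > 0 → (((result ++ [key]).length : Int)) < limit := by
              intro _; simp at hfull ⊢; have := hlt hlim; omega
            rw [ih _ hlt']
            have harith : limit.toNat - result.length = (limit.toNat - (result ++ [key]).length) + 1 := by
              have := hlt hlim; simp at this ⊢; omega
            simp only [hlim, if_pos, List.filter_cons, hk, if_pos, harith, List.take_succ_cons]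
            simp
        · rw [if_neg (by tauto), ih _ (by tauto)]
          simp [hlim, hk]

theorem filters_eq (section_filter : String) (slug : Option String) (keys : List String) :
    (if slug.getD "" ≠ "" then
       (if section_filter ≠ "all" then keys.filter (fun key => PySem.Str.startswith key (section_filter ++ "/")) else keys).filter
         (fun key => slugPart key == slug.getD "")
     else
       (if section_filter ≠ "all" then keys.filter (fun key => PySem.Str.startswith key (section_filter ++ "/")) else keys)) =
    keys.filter (keepKey section_filter slug) := by
  by_cases hsf : section_filter = "all" <;> by_cases hslug : slug.getD "" = "" <;>
    simp only [hsf, hslug, ne_eq, not_true_eq_false, not_false_eq_true, ite_true, ite_false,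
      List.filter_filter]
  · exact (List.filter_eq_self.2 (fun k _ => by simp [keepKey, skipSection, skipSlug, hslug])).symm
  · exact List.filter_congr (fun k _ => by simp [keepKey, skipSection, skipSlug, hslug, bne])
  · exact List.filter_congr (fun k _ => by
      simp [keepKey, skipSection, skipSlug, hsf, hslug, bne, beq_iff_eq])
  · exact List.filter_congr (fun k _ => by
      have hx : (slug.getD "" == "") = false := by simp [hslug]
      have hy : (section_filter == "all") = false := by simp [hsf]
      simp [keepKey, skipSection, skipSlug, bne, hx, hy, Bool.and_comm])

theorem select_article_keys_spec : Claim_equal_select_article_keys := by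
  intro plan section_filter slug limit _ _
  unfold Spec_select_article_keys select_article_keys select_article_keys_alt
  rw [altLoop_spec section_filter slug limit (articleKeys plan) [] (by intro h; simpa using h)]
  simp only [List.nil_append, List.length_nil, Nat.sub_zero]
  by_cases hlim : limit > 0
  · rw [if_pos hlim, if_pos hlim, PySem.List.slice_to _ hlim.le, filters_eq]
  · rw [if_neg hlim, if_neg hlim, filters_eq]
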